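-- pv_equiv track=rewrite | github.com/Konstannttiinn1/keyword-alert-bot_pro | bot_app.py | resolve_tenant_for_admin
-- ===== SOURCE A (Python) =====
-- from typing import Any
--
-- def resolve_tenant_for_admin(admin_id: int, tenants: dict[str, dict[str, Any]], default_tenant: str | None) -> str | None:
--     for tenant_id, cfg in tenants.items():
--         if admin_id in cfg.get("admins", []):
--             if default_tenant and tenant_id == default_tenant:
--                 return tenant_id
--     for tenant_id, cfg in tenants.items():
--         if admin_id in cfg.get("admins", []):
--             return tenant_id
--     return None
-- ===== SOURCE B (Python) =====
-- def resolve_tenant_for_admin(admin_id, tenants, default_tenant):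
--     first_match = None
--     for tenant_id, cfg in tenants.items():
--         if admin_id in cfg.get("admins", []):
--             if default_tenant and tenant_id == default_tenant:
--                 return tenant_id
--             if first_match is None:
--                 first_match = tenant_id
--     return first_match
-- ===== Notes on version B (the rewrite author's own statement) =====
-- stated objective: simpler
-- what changed: A scans the tenants dict twice (one pass looking for the truthy default tenant, a second full pass for any match); B makes a single pass, returning the default tenant immediately and remembering the first other match as a fallback.
import Mathlib
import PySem

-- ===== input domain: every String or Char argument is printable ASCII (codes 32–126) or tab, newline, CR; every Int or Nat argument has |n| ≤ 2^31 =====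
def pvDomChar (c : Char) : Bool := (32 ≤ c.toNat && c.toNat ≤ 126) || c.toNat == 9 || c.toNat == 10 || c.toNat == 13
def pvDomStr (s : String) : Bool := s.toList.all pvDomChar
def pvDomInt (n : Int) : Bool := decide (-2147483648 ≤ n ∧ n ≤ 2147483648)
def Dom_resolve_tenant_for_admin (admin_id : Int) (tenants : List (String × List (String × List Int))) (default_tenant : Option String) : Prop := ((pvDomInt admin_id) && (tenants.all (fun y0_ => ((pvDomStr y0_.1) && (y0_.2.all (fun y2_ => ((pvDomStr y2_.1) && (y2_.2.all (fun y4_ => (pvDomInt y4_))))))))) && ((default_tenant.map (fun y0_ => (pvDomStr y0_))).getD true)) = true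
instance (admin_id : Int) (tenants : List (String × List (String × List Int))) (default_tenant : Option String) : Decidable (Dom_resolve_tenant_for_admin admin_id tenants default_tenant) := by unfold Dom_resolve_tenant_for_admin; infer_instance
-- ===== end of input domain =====

-- B folds A's two passes over the tenants dict into a single pass that remembers
-- the first non-default match as a fallback (objective: simpler, one pass).

-- ===== PORT A =====
-- cfg.get("admins", []) : first-match association lookup with default
def rtfaAdmins (cfg : List (String × List Int)) : List Int :=
  (PySem.Dict.mk cfg).getD "admins" []

-- Python truthiness of `default_tenant and tenant_id == default_tenant`
def rtfaDefaultHit (default_tenant : Option String) (tenant_id : String) : Bool :=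
  match default_tenant with
  | none => false
  | some s => (s != "") && (tenant_id == s)

-- first pass of A: return the tenant only when it matches AND is the truthy default
def rtfaScan1 (admin_id : Int) (default_tenant : Option String) :
    List (String × List (String × List Int)) → Option String
  | [] => none
  | (tid, cfg) :: rest =>
    if admin_id ∈ rtfaAdmins cfg then
      if rtfaDefaultHit default_tenant tid then some tid
      else rtfaScan1 admin_id default_tenant rest
    else rtfaScan1 admin_id default_tenant rest

-- second pass of A: return the first tenant containing admin_id
def rtfaScan2 (admin_id : Int) :
    List (String × List (String × List Int)) → Option String
  | [] => none
  | (tid, cfg) :: rest =>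
    if admin_id ∈ rtfaAdmins cfg then some tid
    else rtfaScan2 admin_id rest

def resolve_tenant_for_admin (admin_id : Int) (tenants : List (String × List (String × List Int))) (default_tenant : Option String) : Option String :=
  match rtfaScan1 admin_id default_tenant tenants with
  | some t => some t
  | none => rtfaScan2 admin_id tenants

-- ===== PORT B =====
-- single pass carrying `first_match`
def rtfaLoop (admin_id : Int) (default_tenant : Option String) (first_match : Option String) :
    List (String × List (String × List Int)) → Option String
  | [] => first_match
  | (tid, cfg) :: rest =>
    if admin_id ∈ rtfaAdmins cfg then
      if rtfaDefaultHit default_tenant tid then some tid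
      else
        rtfaLoop admin_id default_tenant
          (match first_match with | none => some tid | some f => some f) rest
    else rtfaLoop admin_id default_tenant first_match rest

def resolve_tenant_for_admin_alt (admin_id : Int) (tenants : List (String × List (String × List Int))) (default_tenant : Option String) : Option String :=
  rtfaLoop admin_id default_tenant none tenants

-- ===== PRECONDITION & SPEC =====
def Spec_resolve_tenant_for_admin (admin_id : Int) (tenants : List (String × List (String × List Int))) (default_tenant : Option String) (out : Option String) : Prop := out = resolve_tenant_for_admin_alt admin_id tenants default_tenant
instance (admin_id : Int) (tenants : List (String × List (String × List Int))) (default_tenant : Option String) (out : Option String) : Decidable (Spec_resolve_tenant_for_admin admin_id tenants default_tenant out) := by unfold Spec_resolve_tenant_for_admin; infer_instance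

-- ===== CLAIM (what is proved, stated in full; the proofs are below) =====
def Claim_equal_resolve_tenant_for_admin : Prop := ∀ (admin_id : Int) (tenants : List (String × List (String × List Int))) (default_tenant : Option String), Dom_resolve_tenant_for_admin admin_id tenants default_tenant → Spec_resolve_tenant_for_admin admin_id tenants default_tenant (resolve_tenant_for_admin admin_id tenants default_tenant)

-- ===== LEMMAS AND PROOFS =====

-- Loop invariant: B's single pass computes scan1, else the carried fallback, else scan2.
theorem rtfaLoop_eq (admin_id : Int) (default_tenant : Option String)
    (first_match : Option String) (ts : List (String × List (String × List Int))) :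
    rtfaLoop admin_id default_tenant first_match ts =
      ((rtfaScan1 admin_id default_tenant ts).or
        (first_match.or (rtfaScan2 admin_id ts))) := by
  induction ts generalizing first_match with
  | nil => simp [rtfaLoop, rtfaScan1, rtfaScan2]
  | cons hd rest ih =>
    obtain ⟨tid, cfg⟩ := hd
    by_cases hmem : admin_id ∈ rtfaAdmins cfg
    · by_cases hdef : rtfaDefaultHit default_tenant tid
      · simp [rtfaLoop, rtfaScan1, hmem, hdef]
      · cases first_match with
        | none => simp [rtfaLoop, rtfaScan1, rtfaScan2, hmem, hdef, ih]
        | some f => simp [rtfaLoop, rtfaScan1, rtfaScan2, hmem, hdef, ih]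
    · simp [rtfaLoop, rtfaScan1, rtfaScan2, hmem, ih]

-- ===== VERDICT (by name: the statement is the Claim_ definition above) =====
theorem resolve_tenant_for_admin_spec : Claim_equal_resolve_tenant_for_admin := by
  intro admin_id tenants default_tenant _
  unfold Spec_resolve_tenant_for_admin resolve_tenant_for_admin resolve_tenant_for_admin_alt
  rw [rtfaLoop_eq]
  cases h : rtfaScan1 admin_id default_tenant tenants <;> simp [Option.or]
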